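-- pv_equiv track=rewrite | github.com/kimathinyota/social-group-simulator | SocialAnalysis.py | non_subset_groups
-- ===== SOURCE A (Python) =====
-- def non_subset_groups(groups):
--     non_subsets = []
--     for g in groups:
--         is_subset = False
--         for g2 in groups:
--             if g != g2:
--                 if set(g).issubset(g2):
--                     is_subset = True
--         if not is_subset:
--             non_subsets.append(g)
--     return non_subsets
-- ===== SOURCE B (Python) =====
-- def non_subset_groups(groups):
--     # Inverted index: element value -> set of indices of groups containing it.
--     index = {}
--     for i, g in enumerate(groups):
--         for e in g:
--             index.setdefault(e, set()).add(i)
--     all_idx = set(range(len(groups)))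
--     out = []
--     for g in groups:
--         cands = all_idx
--         for e in g:
--             cands = cands & index.get(e, set())
--         if all(groups[j] == g for j in cands):
--             out.append(g)
--     return out
-- ===== Notes on version B (the rewrite author's own statement) =====
-- stated objective: faster
-- what changed: Replaces A's all-pairs subset scan with an inverted index mapping each element to the set of indices of groups containing it; a group's candidate supersets are found by intersecting the index entries of its elements, and the group is kept iff every candidate is list-equal to it.
import Mathlib
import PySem

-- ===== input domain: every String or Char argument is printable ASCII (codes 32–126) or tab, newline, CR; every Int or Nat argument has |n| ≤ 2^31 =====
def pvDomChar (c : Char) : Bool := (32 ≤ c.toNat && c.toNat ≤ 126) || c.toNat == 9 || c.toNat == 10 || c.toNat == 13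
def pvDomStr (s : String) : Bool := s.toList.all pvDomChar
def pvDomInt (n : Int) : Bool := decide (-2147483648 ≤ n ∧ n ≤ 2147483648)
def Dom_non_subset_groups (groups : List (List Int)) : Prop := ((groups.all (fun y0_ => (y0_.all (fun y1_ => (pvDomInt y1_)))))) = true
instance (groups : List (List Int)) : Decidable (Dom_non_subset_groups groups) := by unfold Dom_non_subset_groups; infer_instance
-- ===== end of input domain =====

-- B replaces A's all-pairs subset scan by an inverted index (element -> indices of groups
-- containing it) and intersects index entries to find each group's candidate supersets
-- (measured faster in a timing run; asymptotically better when index entries are small).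

-- ===== PORT A =====
def non_subset_groups (groups : List (List Int)) : List (List Int) :=
  groups.foldl (fun non_subsets g =>
    let is_subset := groups.foldl (fun is_subset g2 =>
      if g != g2 then
        (if PySem.Set.issubset (PySem.Set.ofList g) g2 then true else is_subset)
      else is_subset) false
    if !is_subset then non_subsets ++ [g] else non_subsets) []

-- ===== PORT B =====
-- 'index.setdefault(e, set()).add(i)' updates the entry at e in place:
-- ported as insert of (getD e ∅).add i (exact: same resulting mapping and key order).
def nsgIndex (groups : List (List Int)) : PySem.Dict Int (PySem.Set Int) :=
  (PySem.List.enumerate groups).foldl (fun index p =>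
    p.2.foldl (fun index e =>
      index.insert e (PySem.Set.add (index.getD e PySem.Set.empty) p.1)) index)
    PySem.Dict.empty

def non_subset_groups_alt (groups : List (List Int)) : List (List Int) :=
  let index := nsgIndex groups
  let allIdx : PySem.Set Int := PySem.Set.ofList (PySem.List.pyRange 0 (groups.length : Int) 1)
  groups.foldl (fun out g =>
    let cands := g.foldl (fun cands e =>
      PySem.Set.inter cands (index.getD e PySem.Set.empty)) allIdx
    if cands.all (fun j => PySem.List.pyGetD groups j [] == g) then out ++ [g] else out) []

-- ===== PRECONDITION & SPEC =====
def Spec_non_subset_groups (groups : List (List Int)) (out : List (List Int)) : Prop := out = non_subset_groups_alt groups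
instance (groups : List (List Int)) (out : List (List Int)) : Decidable (Spec_non_subset_groups groups out) := by unfold Spec_non_subset_groups; infer_instance

-- ===== CLAIM (what is proved, stated in full; the proofs are below) =====
def Claim_equal_non_subset_groups : Prop := ∀ (groups : List (List Int)), Dom_non_subset_groups groups → Spec_non_subset_groups groups (non_subset_groups groups)

-- ===== LEMMAS AND PROOFS =====

-- A's result as a filter
lemma A_eq_filter (groups : List (List Int)) :
    non_subset_groups groups =
      groups.filter (fun g => !groups.any (fun g2 =>
        (g != g2) && PySem.Set.issubset (PySem.Set.ofList g) g2)) := by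
  unfold non_subset_groups
  have key : ∀ g : List Int,
      groups.foldl (fun is_subset g2 =>
        if g != g2 then
          (if PySem.Set.issubset (PySem.Set.ofList g) g2 then true else is_subset)
        else is_subset) false
      = groups.any (fun g2 => (g != g2) && PySem.Set.issubset (PySem.Set.ofList g) g2) := by
    intro g
    have hfun : (fun (is_subset : Bool) (g2 : List Int) =>
        if g != g2 then
          (if PySem.Set.issubset (PySem.Set.ofList g) g2 then true else is_subset)
        else is_subset)
      = (fun (b : Bool) (g2 : List Int) =>
          if (g != g2) && PySem.Set.issubset (PySem.Set.ofList g) g2 then true else b) := by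
      funext b g2
      cases hne : (g != g2) <;> cases hsub : PySem.Set.issubset (PySem.Set.ofList g) g2 <;>
        simp [*]
    rw [hfun, PySem.List.foldl_if_true_eq]
    simp
  simp only [key]
  rw [PySem.List.foldl_append_if_eq_filter]
  simp

-- B's result as a filter
lemma B_eq_filter (groups : List (List Int)) :
    non_subset_groups_alt groups =
      groups.filter (fun g =>
        (g.foldl (fun cands e =>
          PySem.Set.inter cands ((nsgIndex groups).getD e PySem.Set.empty))
          (PySem.Set.ofList (PySem.List.pyRange 0 (groups.length : Int) 1))).all
            (fun j => PySem.List.pyGetD groups j [] == g)) := by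
  unfold non_subset_groups_alt
  simp only []
  rw [PySem.List.foldl_append_if_eq_filter]
  simp

-- membership in the intersection fold
lemma mem_foldl_inter (g : List Int) (f : Int → PySem.Set Int) (c0 : PySem.Set Int) (j : Int) :
    j ∈ g.foldl (fun c e => PySem.Set.inter c (f e)) c0 ↔ j ∈ c0 ∧ ∀ e ∈ g, j ∈ f e := by
  induction g generalizing c0 with
  | nil => simp
  | cons a t ih =>
      simp only [List.foldl_cons, ih, PySem.Set.mem_inter, List.mem_cons]
      aesop


-- one group's elements folded into the dict
lemma mem_getD_innerFold (g : List Int) (d : PySem.Dict Int (PySem.Set Int)) (i : Int) (e j : Int) :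
    j ∈ (g.foldl (fun d e =>
        d.insert e (PySem.Set.add (d.getD e PySem.Set.empty) i)) d).getD e PySem.Set.empty ↔
      j ∈ d.getD e PySem.Set.empty ∨ (e ∈ g ∧ j = i) := by
  induction g generalizing d with
  | nil => simp
  | cons a t ih =>
      simp only [List.foldl_cons, ih, PySem.Dict.getD_insert, List.mem_cons]
      by_cases h : e = a
      · subst h; simp [PySem.Set.mem_add]; try tauto
      · simp [h]; try tauto

-- the whole index-building fold
lemma mem_getD_indexFold (l : List (List Int)) (e j : Int) :
    ∀ (s : Int) (d : PySem.Dict Int (PySem.Set Int)),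
    j ∈ ((PySem.List.enumerate l s).foldl (fun index p =>
        p.2.foldl (fun index e =>
          index.insert e (PySem.Set.add (index.getD e PySem.Set.empty) p.1)) index) d).getD e PySem.Set.empty ↔
      j ∈ d.getD e PySem.Set.empty ∨ ∃ p ∈ PySem.List.enumerate l s, e ∈ p.2 ∧ j = p.1 := by
  induction l with
  | nil => intro s d; simp [PySem.List.enumerate_nil]
  | cons a t ih =>
      intro s d
      simp only [PySem.List.enumerate_cons, List.foldl_cons, ih, mem_getD_innerFold, List.mem_cons]
      constructor
      · rintro ((h | ⟨he, hj⟩) | ⟨p, hp, hep, hj⟩)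
        · exact Or.inl h
        · exact Or.inr ⟨(s, a), Or.inl rfl, he, hj⟩
        · exact Or.inr ⟨p, Or.inr hp, hep, hj⟩
      · rintro (h | ⟨p, (rfl | hp), hep, hj⟩)
        · exact Or.inl (Or.inl h)
        · exact Or.inl (Or.inr ⟨hep, hj⟩)
        · exact Or.inr ⟨p, hp, hep, hj⟩

lemma mem_nsgIndex (groups : List (List Int)) (e j : Int) :
    j ∈ (nsgIndex groups).getD e PySem.Set.empty ↔
      ∃ k : Nat, ∃ h : k < groups.length, e ∈ groups[k] ∧ j = (k : Int) := by
  unfold nsgIndex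
  rw [mem_getD_indexFold _ _ _ 0 PySem.Dict.empty]
  simp only [PySem.Dict.getD_empty]
  constructor
  · rintro (h | ⟨p, hp, hep, rfl⟩)
    · simp [PySem.Set.empty] at h
    · obtain ⟨k, hk, rfl⟩ := (PySem.List.mem_enumerate_iff _ _ _).mp hp
      exact ⟨k, hk, hep, by simp⟩
  · rintro ⟨k, hk, hek, rfl⟩
    exact Or.inr ⟨((k : Int), groups[k]), (PySem.List.mem_enumerate_iff _ _ _).mpr ⟨k, hk, by simp⟩, hek, rfl⟩

lemma mem_allIdx (groups : List (List Int)) (j : Int) :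
    j ∈ PySem.Set.ofList (PySem.List.pyRange 0 (groups.length : Int) 1) ↔
      ∃ k : Nat, k < groups.length ∧ j = (k : Int) := by
  rw [PySem.Set.mem_ofList]
  have h : PySem.List.pyRange 0 (groups.length : Int) 1 =
      (PySem.List.enumerate groups 0).map (·.1) := by
    rw [PySem.List.map_fst_enumerate]; norm_num
  rw [h, List.mem_map]
  constructor
  · rintro ⟨p, hp, rfl⟩
    obtain ⟨k, hk, rfl⟩ := (PySem.List.mem_enumerate_iff _ _ _).mp hp
    exact ⟨k, hk, by simp⟩
  · rintro ⟨k, hk, rfl⟩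
    exact ⟨((k : Int), groups[k]), (PySem.List.mem_enumerate_iff _ _ _).mpr ⟨k, hk, by simp⟩, rfl⟩

-- the two keep-conditions agree
lemma keep_eq (groups : List (List Int)) (g : List Int) :
    ((g.foldl (fun cands e =>
        PySem.Set.inter cands ((nsgIndex groups).getD e PySem.Set.empty))
        (PySem.Set.ofList (PySem.List.pyRange 0 (groups.length : Int) 1))).all
          (fun j => PySem.List.pyGetD groups j [] == g)) =
      (!groups.any (fun g2 => (g != g2) && PySem.Set.issubset (PySem.Set.ofList g) g2)) := by
  have hc : ∀ j : Int,
      (j ∈ g.foldl (fun cands e =>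
        PySem.Set.inter cands ((nsgIndex groups).getD e PySem.Set.empty))
        (PySem.Set.ofList (PySem.List.pyRange 0 (groups.length : Int) 1))) ↔
      ∃ k : Nat, ∃ h : k < groups.length, j = (k : Int) ∧ ∀ e ∈ g, e ∈ groups[k] := by
    intro j
    rw [mem_foldl_inter, mem_allIdx]
    constructor
    · rintro ⟨⟨k, hk, rfl⟩, hall⟩
      refine ⟨k, hk, rfl, fun e he => ?_⟩
      obtain ⟨k', hk', he', hkk'⟩ := (mem_nsgIndex groups e _).mp (hall e he)
      obtain rfl : k' = k := by exact_mod_cast hkk'.symm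
      exact he'
    · rintro ⟨k, hk, rfl, hall⟩
      exact ⟨⟨k, hk, rfl⟩, fun e he => (mem_nsgIndex groups e _).mpr ⟨k, hk, hall e he, rfl⟩⟩
  rw [Bool.eq_iff_iff]
  simp only [List.all_eq_true, Bool.not_eq_true', List.any_eq_false, Bool.and_eq_true,
    bne_iff_ne, ne_eq, beq_iff_eq, PySem.Set.issubset_iff, PySem.Set.mem_ofList,
    not_and, not_forall]
  constructor
  · intro hB g2 hg2 hne
    obtain ⟨k, hk, rfl⟩ := List.mem_iff_getElem.mp hg2
    by_contra hsub
    rw [not_exists] at hsub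
    have hsub' : ∀ e ∈ g, e ∈ groups[k] := by
      intro e he
      by_contra hne'
      exact hsub e ⟨he, hne'⟩
    have := hB ((k : Int)) ((hc _).mpr ⟨k, hk, rfl, hsub'⟩)
    rw [PySem.List.pyGetD_natCast] at this
    exact hne (by rw [← this, List.getD_eq_getElem groups [] hk])
  · intro hA j hj
    obtain ⟨k, hk, rfl, hall⟩ := (hc j).mp hj
    rw [PySem.List.pyGetD_natCast, List.getD_eq_getElem groups [] hk]
    by_contra hne
    obtain ⟨e, he, hne'⟩ := hA groups[k] (List.getElem_mem hk) (fun h => hne h.symm)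
    exact hne' (hall e he)

-- ===== VERDICT (by name: the statement is the Claim_ definition above) =====
theorem non_subset_groups_spec : Claim_equal_non_subset_groups := by
  intro groups _
  unfold Spec_non_subset_groups
  rw [A_eq_filter, B_eq_filter]
  exact (List.filter_congr (fun g _ => keep_eq groups g)).symm
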